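-- pv_equiv track=rewrite | github.com/LaussenLabs/atriumdb | sdk/atriumdb/windowing/map_definition_sources.py | aggregate_time_ranges
-- ===== SOURCE A (Python) =====
-- from typing import List, Tuple
--
-- def aggregate_time_ranges(device_patient_data: List[Tuple[int, int, int, int]]):
--     result = {}
--     for device_id, patient_id, start_time, end_time in device_patient_data:
--         key = (device_id, patient_id)
--         if key not in result:
--             result[key] = []
--         result[key].append([start_time, end_time])
--
--     # Sort the time ranges for each unique (device_id, patient_id) pair
--     for key in result:
--         result[key].sort(key=lambda x: x[0])
--
--     return result
-- ===== SOURCE B (Python) =====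
-- from typing import List, Tuple
--
-- def aggregate_time_ranges(device_patient_data: List[Tuple[int, int, int, int]]):
--     # one global stable sort by start_time; each group's rows appear in it already ordered
--     by_start = sorted(device_patient_data, key=lambda r: r[2])
--     # distinct keys in first-appearance order
--     keys = []
--     for d, p, _, _ in device_patient_data:
--         if (d, p) not in keys:
--             keys.append((d, p))
--     # build each group by filtering the globally sorted rows; no dict mutation, no per-group sort
--     return {k: [[s, e] for d, p, s, e in by_start if (d, p) == k] for k in keys}
-- ===== Notes on version B (the rewrite author's own statement) =====
-- stated objective: alternative
-- what changed: B replaces A's incremental dict building with per-group sorts by one global stable sort by start_time, an explicit first-appearance key dedup pass, and a per-key filter comprehension over the sorted rows, so no dict is mutated and no per-group sort runs.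
import Mathlib
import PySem

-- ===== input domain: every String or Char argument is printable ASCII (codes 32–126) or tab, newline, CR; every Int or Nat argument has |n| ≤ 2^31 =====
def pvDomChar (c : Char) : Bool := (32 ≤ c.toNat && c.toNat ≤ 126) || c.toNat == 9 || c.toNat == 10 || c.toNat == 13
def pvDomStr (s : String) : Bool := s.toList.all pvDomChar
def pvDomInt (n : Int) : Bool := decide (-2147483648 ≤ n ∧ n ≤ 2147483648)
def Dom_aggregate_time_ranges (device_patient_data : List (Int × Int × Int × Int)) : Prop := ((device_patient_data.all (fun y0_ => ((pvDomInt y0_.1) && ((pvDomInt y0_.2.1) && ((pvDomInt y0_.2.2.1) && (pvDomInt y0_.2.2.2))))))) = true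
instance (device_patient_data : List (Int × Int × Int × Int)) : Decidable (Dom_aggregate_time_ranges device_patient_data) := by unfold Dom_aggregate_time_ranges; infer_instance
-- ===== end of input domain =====

-- B replaces A's incremental dict building with per-group sorts by one global stable sort by
-- start_time, an explicit first-appearance key dedup pass and a per-key filter over the sorted
-- rows (objective: alternative — no dict is mutated and no per-group sort runs).

-- ===== PORT A =====
def aggregate_time_ranges (device_patient_data : List (Int × Int × Int × Int)) : List (Int × Int × List (List Int)) :=
  let result : PySem.Dict (Int × Int) (List (List Int)) :=
    device_patient_data.foldl (fun result row =>
      let key := (row.1, row.2.1)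
      let result := if result.contains key then result else result.insert key []
      result.insert key (result.getD key [] ++ [[row.2.2.1, row.2.2.2]])) PySem.Dict.empty
  -- for key in result: result[key].sort(key=lambda x: x[0])
  let result : PySem.Dict (Int × Int) (List (List Int)) :=
    PySem.Dict.mk (result.items.map (fun p => (p.1, PySem.List.sorted p.2 (fun x => PySem.List.pyGetD x 0 0) false)))
  result.items.map (fun p => (p.1.1, p.1.2, p.2))

-- ===== PORT B =====
def aggregate_time_ranges_alt (device_patient_data : List (Int × Int × Int × Int)) : List (Int × Int × List (List Int)) :=
  -- by_start = sorted(device_patient_data, key=lambda r: r[2])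
  let by_start := PySem.List.sorted device_patient_data (fun r => r.2.2.1) false
  -- keys = []; for d, p, _, _ in data: if (d, p) not in keys: keys.append((d, p))
  let keys : List (Int × Int) := device_patient_data.foldl
    (fun keys r => if keys.contains (r.1, r.2.1) then keys else keys ++ [(r.1, r.2.1)]) []
  -- {k: [[s, e] for d, p, s, e in by_start if (d, p) == k] for k in keys}
  keys.map (fun k => (k.1, k.2,
    (by_start.filter (fun r => (r.1, r.2.1) == k)).map (fun r => [r.2.2.1, r.2.2.2])))

-- ===== PRECONDITION & SPEC =====
def Spec_aggregate_time_ranges (device_patient_data : List (Int × Int × Int × Int)) (out : List (Int × Int × List (List Int))) : Prop := out = aggregate_time_ranges_alt device_patient_data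
instance (device_patient_data : List (Int × Int × Int × Int)) (out : List (Int × Int × List (List Int))) : Decidable (Spec_aggregate_time_ranges device_patient_data out) := by unfold Spec_aggregate_time_ranges; infer_instance

-- ===== CLAIM (what is proved, stated in full; the proofs are below) =====
def Claim_equal_aggregate_time_ranges : Prop := ∀ (device_patient_data : List (Int × Int × Int × Int)), Dom_aggregate_time_ranges device_patient_data → Spec_aggregate_time_ranges device_patient_data (aggregate_time_ranges device_patient_data)

-- ===== LEMMAS AND PROOFS =====

-- key / value / sort-key projections of a row (proof-side abbreviations)
def pvKeyF (r : Int × Int × Int × Int) : Int × Int := (r.1, r.2.1)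
def pvValF (r : Int × Int × Int × Int) : List Int := [r.2.2.1, r.2.2.2]
def pvKsF (r : Int × Int × Int × Int) : Int := r.2.2.1

-- A's setdefault-then-append step is the modify-by-key step
theorem pv_foldA_eq (l : List (Int × Int × Int × Int)) (d : PySem.Dict (Int × Int) (List (List Int))) :
    l.foldl (fun result row =>
      let key := (row.1, row.2.1)
      let result := if result.contains key then result else result.insert key []
      result.insert key (result.getD key [] ++ [[row.2.2.1, row.2.2.2]])) d
    = l.foldl (fun d r => d.modify (pvKeyF r) [] (· ++ [pvValF r])) d := by
  apply PySem.List.foldl_congr_mem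
  intro acc r _
  by_cases h : acc.contains (r.1, r.2.1) = true
  · simp [pvKeyF, pvValF, PySem.Dict.modify, h]
  · have h' : acc.contains (r.1, r.2.1) = false := by simpa using h
    simp [pvKeyF, pvValF, PySem.Dict.modify, h', PySem.Dict.getD_insert_self,
      PySem.Dict.insert_insert_self, PySem.Dict.getD_of_not_contains _ _ h']

-- the grouping fold's value at a key
theorem pv_getD_group (l : List (Int × Int × Int × Int)) (d : PySem.Dict (Int × Int) (List (List Int))) (c : Int × Int) :
    (l.foldl (fun d r => d.modify (pvKeyF r) [] (· ++ [pvValF r])) d).getD c []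
    = d.getD c [] ++ (l.filter (fun r => pvKeyF r == c)).map pvValF := by
  have h := PySem.Dict.getD_foldl_modify_append (l.map (fun r => (pvKeyF r, pvValF r))) d c
  rw [List.foldl_map] at h
  simpa [List.filter_map, Function.comp] using h

-- insertBy commutes with map when the comparison factors through the map
theorem pv_insertBy_map {α β : Type} (g : α → β) (before : β → β → Bool) (x : α) (l : List α) :
    PySem.List.insertBy before (g x) (l.map g)
    = (PySem.List.insertBy (fun a b => before (g a) (g b)) x l).map g := by
  induction l with
  | nil => simp [PySem.List.insertBy]
  | cons y ys ih =>
    simp only [List.map_cons, PySem.List.insertBy]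
    split <;> simp_all

theorem pv_sorted_snoc {α κ : Type} [LT κ] [DecidableLT κ] (l : List α) (x : α) (key : α → κ) :
    PySem.List.sorted (l ++ [x]) key false
    = PySem.List.insertBy (fun a b => decide (key a < key b)) x (PySem.List.sorted l key false) := by
  rw [PySem.List.sorted_eq_foldl_insertBy, PySem.List.sorted_eq_foldl_insertBy, List.foldl_append]
  rfl

-- sorting a mapped list = mapping the list sorted by the composed key
theorem pv_sorted_map {α β κ : Type} [LT κ] [DecidableLT κ] (g : α → β) (key : β → κ) (l : List α) :
    PySem.List.sorted (l.map g) key false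
    = (PySem.List.sorted l (fun a => key (g a)) false).map g := by
  induction l using List.reverseRecOn with
  | nil => rfl
  | append_singleton t x ih =>
    rw [List.map_append, List.map_singleton, pv_sorted_snoc, pv_sorted_snoc, ih, pv_insertBy_map]

theorem pv_insertBy_head {α : Type} (before : α → α → Bool) (x : α) (t : List α)
    (h : ∀ z ∈ t, before x z = true) : PySem.List.insertBy before x t = x :: t := by
  cases t with
  | nil => simp [PySem.List.insertBy]
  | cons z t => simp [PySem.List.insertBy, h z (by simp)]

-- filtering through a stable insertion into a sorted list
theorem pv_insertBy_filter {α κ : Type} [LinearOrder κ] (key : α → κ) (p : α → Bool) (x : α) :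
    ∀ s : List α, s.Pairwise (fun a b => key a ≤ key b) →
    (PySem.List.insertBy (fun a b => decide (key a < key b)) x s).filter p
    = if p x then PySem.List.insertBy (fun a b => decide (key a < key b)) x (s.filter p)
      else s.filter p := by
  intro s
  induction s with
  | nil => intro _; by_cases hp : p x <;> simp [PySem.List.insertBy, hp]
  | cons y ys ih =>
    intro hs
    by_cases hxy : key x < key y
    · have hins : PySem.List.insertBy (fun a b => decide (key a < key b)) x (y :: ys) = x :: y :: ys := by
        simp [PySem.List.insertBy, hxy]
      rw [hins]
      by_cases hp : p x
      · rw [List.filter_cons_of_pos hp]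
        rw [pv_insertBy_head _ x _ ?_]
        · simp [hp]
        · intro z hz
          have hz' : z ∈ y :: ys := List.mem_of_mem_filter hz
          rcases List.mem_cons.mp hz' with rfl | hz''
          · simpa using hxy
          · have : key y ≤ key z := (List.pairwise_cons.mp hs).1 z hz''
            simp [lt_of_lt_of_le hxy this]
      · rw [List.filter_cons_of_neg hp, if_neg hp]
    · have hins : PySem.List.insertBy (fun a b => decide (key a < key b)) x (y :: ys)
          = y :: PySem.List.insertBy (fun a b => decide (key a < key b)) x ys := by
        simp [PySem.List.insertBy, hxy]
      rw [hins, List.filter_cons, ih (List.pairwise_cons.mp hs).2, List.filter_cons]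
      by_cases hpy : p y <;> by_cases hpx : p x <;>
        simp [hpy, hpx, PySem.List.insertBy, hxy]

-- stable sort commutes with filter
theorem pv_sorted_filter {α κ : Type} [LinearOrder κ] (key : α → κ) (p : α → Bool) (l : List α) :
    (PySem.List.sorted l key false).filter p = PySem.List.sorted (l.filter p) key false := by
  induction l using List.reverseRecOn with
  | nil => rfl
  | append_singleton t x ih =>
    rw [pv_sorted_snoc, pv_insertBy_filter key p x _ (PySem.List.sorted_pairwise t key),
      ih, List.filter_append]
    by_cases hp : p x <;> simp [hp, pv_sorted_snoc]

-- per-key values: sorting A's group equals filtering the globally sorted list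
theorem pv_sorted_vals (l : List (Int × Int × Int × Int)) (p : (Int × Int × Int × Int) → Bool) :
    PySem.List.sorted ((l.filter p).map pvValF) (fun x => PySem.List.pyGetD x 0 0) false
    = ((PySem.List.sorted l pvKsF false).filter p).map pvValF := by
  rw [pv_sorted_map pvValF (fun x => PySem.List.pyGetD x 0 0) (l.filter p)]
  have hkey : (fun a => PySem.List.pyGetD (pvValF a) 0 0) = pvKsF := by
    funext r; simp [pvValF, pvKsF, PySem.List.pyGetD_zero_cons]
  rw [hkey, pv_sorted_filter]

-- closed form of port A
theorem pv_A_out (l : List (Int × Int × Int × Int)) :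
    aggregate_time_ranges l
    = (PySem.Set.ofList (l.map pvKeyF)).map (fun k => (k.1, k.2,
        PySem.List.sorted ((l.filter (fun r => pvKeyF r == k)).map pvValF)
          (fun x => PySem.List.pyGetD x 0 0) false)) := by
  unfold aggregate_time_ranges
  rw [pv_foldA_eq]
  dsimp only
  have hnd : ((l.foldl (fun d r => d.modify (pvKeyF r) [] (· ++ [pvValF r]))
      (PySem.Dict.empty : PySem.Dict (Int × Int) (List (List Int))))).keys.Nodup :=
    PySem.Dict.nodup_keys_foldl_insert_key l pvKeyF _ _ (by simp)
  have hkeys : ((l.foldl (fun d r => d.modify (pvKeyF r) [] (· ++ [pvValF r]))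
      (PySem.Dict.empty : PySem.Dict (Int × Int) (List (List Int))))).keys
      = PySem.Set.ofList (l.map pvKeyF) :=
    (PySem.Dict.keys_foldl_insert_key l pvKeyF
      (fun d r => d.getD (pvKeyF r) [] ++ [pvValF r]) PySem.Dict.empty).trans
      (by rw [PySem.Dict.keys_empty, PySem.Set.ofList_eq_foldl]; rfl)
  rw [PySem.Dict.items_eq_map_keys _ hnd [], hkeys]
  simp only [List.map_map]
  refine List.map_congr_left ?_
  intro k _
  simp [pv_getD_group]

-- closed form of port B: the dedup fold IS Set.ofList of the keys,
-- and the filter/map bodies are the named projections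
theorem pv_B_out (l : List (Int × Int × Int × Int)) :
    aggregate_time_ranges_alt l
    = (PySem.Set.ofList (l.map pvKeyF)).map (fun k => (k.1, k.2,
        ((PySem.List.sorted l pvKsF false).filter (fun r => pvKeyF r == k)).map pvValF)) := by
  unfold aggregate_time_ranges_alt
  rw [show PySem.Set.ofList (l.map pvKeyF)
      = l.foldl (fun keys r => if keys.contains (r.1, r.2.1) then keys else keys ++ [(r.1, r.2.1)]) []
    from by rw [PySem.Set.ofList_eq_foldl, List.foldl_map]; rfl]
  rfl

-- ===== VERDICT (by name: the statement is the Claim_ definition above) =====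
theorem aggregate_time_ranges_spec : Claim_equal_aggregate_time_ranges := by
  intro l _
  unfold Spec_aggregate_time_ranges
  rw [pv_A_out, pv_B_out]
  refine List.map_congr_left ?_
  intro k _
  rw [pv_sorted_vals]
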